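-- pv_equiv track=rewrite | github.com/BBstudyFighting/algorithm | 18주차/SUYEON/SQL/programmers_coding test64.py | solution
-- ===== SOURCE A (Python) =====
-- def solution(spell: list, dic: list):
--     spell = {i: 0 for i in spell}
--
--     for x in dic:
--         if len(x) == len(spell):
--             for y in x:
--                 if y in spell:
--                     spell[y] += 1
--                 else:
--                     break
--             if len(set(spell.values())) == 1 and sum(set(spell.values())) == 1:
--                 return 1
--             spell = {i: 0 for i in spell}
--
--     return 2
-- ===== SOURCE B (Python) =====
-- def solution(spell: list, dic: list):
--     target = sorted(set(spell))
--     if not target: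
--         return 2
--     for x in dic:
--         if sorted(x) == target:
--             return 1
--     return 2
-- ===== Notes on version B (the rewrite author's own statement) =====
-- stated objective: alternative
-- what changed: A counts each word's characters in a zeroed dict (early break, value-set uniformity test, dict reset per word); B instead compares canonical sorted forms: it sorts the distinct spell letters once and returns 1 on the first word whose sorted character list equals that target, so no counts or per-word mutable state exist.
import Mathlib
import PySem

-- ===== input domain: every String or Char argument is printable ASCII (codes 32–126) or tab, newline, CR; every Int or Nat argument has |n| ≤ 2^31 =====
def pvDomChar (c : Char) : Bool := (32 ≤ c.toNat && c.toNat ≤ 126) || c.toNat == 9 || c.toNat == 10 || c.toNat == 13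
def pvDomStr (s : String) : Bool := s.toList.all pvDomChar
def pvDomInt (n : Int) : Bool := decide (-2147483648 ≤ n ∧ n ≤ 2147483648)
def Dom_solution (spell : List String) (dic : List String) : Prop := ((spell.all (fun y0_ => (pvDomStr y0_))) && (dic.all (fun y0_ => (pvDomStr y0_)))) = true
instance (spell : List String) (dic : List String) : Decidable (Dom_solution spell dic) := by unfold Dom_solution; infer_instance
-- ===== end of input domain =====

-- B replaces A's per-word character-counting dict (with break, value-set test and dict reset)
-- by a canonical-form comparison: the distinct spell letters are sorted once and each word's
-- sorted character list is compared against that target (objective: alternative).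

-- ===== PORT A =====
def pvKey (y : Char) : String := String.mk [y]

-- {i: 0 for i in ks}
def pvZero (ks : List String) : PySem.Dict String Int :=
  ks.foldl (fun d i => d.insert i 0) PySem.Dict.empty

-- for y in x: if y in spell: spell[y] += 1 else: break
def pvCountLoop (d : PySem.Dict String Int) (ys : List Char) : PySem.Dict String Int :=
  match ys with
  | [] => d
  | y :: rest =>
    if d.contains (pvKey y) then pvCountLoop (d.modify (pvKey y) 0 (· + 1)) rest
    else d

-- the for x in dic loop with its early return
def pvOuter (d : PySem.Dict String Int) (dic : List String) : Int :=
  match dic with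
  | [] => 2
  | x :: rest =>
    if PySem.Str.len x = (d.size : Int) then
      let d' := pvCountLoop d x.toList
      let vs : PySem.Set Int := PySem.Set.ofList d'.values
      if vs.length = 1 ∧ vs.sum = 1 then 1
      else pvOuter (pvZero d'.keys) rest
    else pvOuter d rest

def solution (spell : List String) (dic : List String) : Int :=
  pvOuter (pvZero spell) dic

-- ===== PORT B =====
-- sorted(x) over a Python string: the list of its one-character strings, sorted
def pvSortedChars (x : String) : List String :=
  PySem.List.sorted (x.toList.map (fun c => String.mk [c])) (fun k => k) false

-- the for x in dic loop of Source B with its early return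
def pvBLoop (target : List String) (dic : List String) : Int :=
  match dic with
  | [] => 2
  | x :: rest => if pvSortedChars x = target then 1 else pvBLoop target rest

def solution_alt (spell : List String) (dic : List String) : Int :=
  let target := PySem.List.sorted (PySem.Set.ofList spell) (fun k => k) false
  if target = [] then 2 else pvBLoop target dic

-- ===== PRECONDITION & SPEC =====
def Spec_solution (spell : List String) (dic : List String) (out : Int) : Prop := out = solution_alt spell dic
instance (spell : List String) (dic : List String) (out : Int) : Decidable (Spec_solution spell dic out) := by unfold Spec_solution; infer_instance

-- ===== CLAIM (what is proved, stated in full; the proofs are below) =====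
def Claim_equal_solution : Prop := ∀ (spell : List String) (dic : List String), Dom_solution spell dic → Spec_solution spell dic (solution spell dic)

-- ===== LEMMAS AND PROOFS =====

-- membership core: on a word of the right length, "each spell letter counted exactly once in the
-- prefix before the break" is the same as "the word's letters are exactly the spell letters"
theorem pv_core {α : Type} [DecidableEq α] (S m : List α) (hS : S.Nodup) (hlen : m.length = S.length) :
    (∀ k ∈ S, (m.takeWhile (fun k => S.contains k)).count k = 1) ↔ (∀ k : α, k ∈ m ↔ k ∈ S) := by
  constructor
  · intro h
    set q := m.takeWhile (fun k => S.contains k) with hq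
    have hqS : ∀ a ∈ q, a ∈ S := by
      intro a ha
      have := List.mem_takeWhile_imp ha
      simpa using this
    have hqnd : q.Nodup := by
      rw [List.nodup_iff_count]
      intro a
      by_cases hm : a ∈ q
      · exact le_of_eq (h a (hqS a hm))
      · simp [List.count_eq_zero.mpr hm]
    have hSq : ∀ a ∈ S, a ∈ q := by
      intro a ha
      have : 0 < q.count a := by rw [h a ha]; norm_num
      exact List.count_pos_iff.mp this
    have hfin : q.toFinset = S.toFinset := by
      ext a; simp only [List.mem_toFinset]
      exact ⟨fun hh => hqS a hh, fun hh => hSq a hh⟩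
    have hql : q.length = S.length := by
      rw [← List.toFinset_card_of_nodup hqnd, ← List.toFinset_card_of_nodup hS, hfin]
    have hqm : q = m :=
      List.IsPrefix.eq_of_length (List.takeWhile_prefix _) (by omega)
    intro k
    constructor
    · intro hk; exact hqS k (hqm ▸ hk)
    · intro hk; exact hqm ▸ hSq k hk
  · intro h
    have hall : ∀ a ∈ m, (fun k => S.contains k) a = true := by
      intro a ha; simpa using (h a).mp ha
    rw [List.takeWhile_eq_self_iff.mpr hall]
    have hcard : m.toFinset = S.toFinset := by
      ext a; simp only [List.mem_toFinset]; exact h a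
    have hdl : m.dedup.length = m.length := by
      rw [← List.card_toFinset m, hcard, List.toFinset_card_of_nodup hS, hlen]
    have hmnd : m.Nodup := by
      have := (List.Sublist.length_eq (List.dedup_sublist m)).mp hdl
      rw [← this]; exact List.nodup_dedup m
    intro k hk
    exact List.count_eq_one_of_mem hmnd ((h k).mpr hk)

-- sorted-form equality against a duplicate-free target, read as length + membership
theorem pv_sorted_iff (S m : List String) (hS : S.Nodup) :
    (PySem.List.sorted m (fun k => k) false = PySem.List.sorted S (fun k => k) false)
      ↔ (m.length = S.length ∧ ∀ k, k ∈ m ↔ k ∈ S) := by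
  rw [PySem.List.sorted_id_eq_sorted_id_iff_perm]
  constructor
  · intro hp
    exact ⟨hp.length_eq, fun k => hp.mem_iff⟩
  · rintro ⟨hlen, hmem⟩
    have hcard : m.toFinset = S.toFinset := by
      ext a; simp only [List.mem_toFinset]; exact hmem a
    have hdl : m.dedup.length = m.length := by
      rw [← List.card_toFinset m, hcard, List.toFinset_card_of_nodup hS, hlen]
    have hmnd : m.Nodup := by
      have := (List.Sublist.length_eq (List.dedup_sublist m)).mp hdl
      rw [← this]; exact List.nodup_dedup m
    exact (List.perm_ext_iff_of_nodup hmnd hS).mpr hmem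

-- the zero dict comprehension, as items over the dedup'd keys
theorem pv_zero_fold (l : List String) (s : PySem.Set String) :
    l.foldl (fun d i => d.insert i 0) (PySem.Dict.mk (s.map (fun k => (k, (0:Int)))))
      = PySem.Dict.mk ((PySem.Set.update s l).map (fun k => (k, (0:Int)))) := by
  induction l generalizing s with
  | nil => simp [PySem.Set.update]
  | cons x xs ih =>
    rw [List.foldl_cons, PySem.Set.update_cons]
    have hstep : (PySem.Dict.mk (s.map (fun k => (k, (0:Int))))).insert x 0
        = PySem.Dict.mk ((s.add x).map (fun k => (k, (0:Int)))) := by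
      by_cases hx : x ∈ s
      · rw [PySem.Set.add_of_mem hx]
        apply PySem.Dict.ext
        have hc : (PySem.Dict.mk (s.map (fun k => (k, (0:Int))))).contains x = true := by
          rw [PySem.Dict.contains_mk]
          simp only [List.any_map, List.any_eq_true]
          exact ⟨x, hx, by simp⟩
        rw [PySem.Dict.items_insert_of_contains _ _ hc]
        simp only [List.map_map]
        apply List.map_congr_left
        intro a _
        simp only [Function.comp]
        by_cases hax : a = x
        · simp [hax]
        · simp [beq_eq_false_iff_ne.mpr hax]
      · rw [PySem.Set.add_of_not_mem hx]
        apply PySem.Dict.ext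
        have hc : (PySem.Dict.mk (s.map (fun k => (k, (0:Int))))).contains x = false := by
          rw [PySem.Dict.contains_mk]
          simp only [List.any_map, List.any_eq_false]
          intro a ha
          simp only [Function.comp]
          rw [beq_eq_false_iff_ne.mpr (fun h : a = x => hx (h ▸ ha))]
          simp
        rw [PySem.Dict.items_insert_of_not_contains _ _ hc]
        simp
    rw [hstep, ih]

-- the counting loop only ever increments keys of the dict
theorem pv_modify_fold (S : List String) (hS : S.Nodup) (m : List String) (hm : ∀ k ∈ m, k ∈ S) :
    ∀ (c : String → Int),
    (m.foldl (fun d k => d.modify k 0 (· + 1)) (PySem.Dict.mk (S.map (fun k => (k, c k))))).items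
      = S.map (fun k => (k, c k + (m.count k : Int))) := by
  induction m with
  | nil => intro c; simp
  | cons k0 m' ih =>
    intro c
    have hk0 : k0 ∈ S := hm k0 (by simp)
    have hkeys : (PySem.Dict.mk (S.map (fun k => (k, c k)))).keys.Nodup := by
      rw [PySem.Dict.keys_mk]; simpa [Function.comp_def] using hS
    have hget : (PySem.Dict.mk (S.map (fun k => (k, c k)))).getD k0 0 = c k0 := by
      apply PySem.Dict.getD_of_mem_items _ _ hkeys
      simp only [List.mem_map]
      exact ⟨k0, hk0, rfl⟩
    have hc : (PySem.Dict.mk (S.map (fun k => (k, c k)))).contains k0 = true := by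
      rw [PySem.Dict.contains_mk]
      simp only [List.any_map, List.any_eq_true]
      exact ⟨k0, hk0, by simp⟩
    have hstep : (PySem.Dict.mk (S.map (fun k => (k, c k)))).modify k0 0 (· + 1)
        = PySem.Dict.mk (S.map (fun k => (k, if k = k0 then c k0 + 1 else c k))) := by
      apply PySem.Dict.ext
      show ((PySem.Dict.mk (S.map (fun k => (k, c k)))).insert k0
          ((PySem.Dict.mk (S.map (fun k => (k, c k)))).getD k0 0 + 1)).items = _
      rw [hget, PySem.Dict.items_insert_of_contains _ _ hc]
      simp only [List.map_map]
      apply List.map_congr_left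
      intro a _
      simp only [Function.comp]
      by_cases hax : a = k0
      · simp [hax]
      · simp [beq_eq_false_iff_ne.mpr hax, hax]
    rw [List.foldl_cons, hstep,
        ih (fun k hk => hm k (by simp [hk])) (fun k => if k = k0 then c k0 + 1 else c k)]
    apply List.map_congr_left
    intro a _
    by_cases hax : a = k0
    · subst hax
      simp [List.count_cons_self]
      ring
    · simp only [if_neg hax]
      simp [List.count_cons]
      exact fun h => hax h.symm

theorem pv_contains_of_keys (d : PySem.Dict String Int) (S : List String) (k : String)
    (h : d.keys = S) : d.contains k = S.contains k := by
  rw [PySem.Dict.contains_eq_decide_mem_keys, h, List.contains_eq_mem]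

-- the inner loop is a modify-fold over the prefix of letters still found in the dict
theorem pv_countLoop_eq (S : List String) :
    ∀ (ys : List Char) (d : PySem.Dict String Int), d.keys = S →
    pvCountLoop d ys
      = ((ys.takeWhile (fun y => S.contains (pvKey y))).map pvKey).foldl
          (fun dd k => dd.modify k 0 (· + 1)) d := by
  intro ys
  induction ys with
  | nil => intro d _; simp [pvCountLoop]
  | cons y rest ih =>
    intro d hd
    rw [pvCountLoop]
    by_cases hy : S.contains (pvKey y) = true
    · rw [if_pos (by rw [pv_contains_of_keys d S _ hd]; exact hy)]
      rw [List.takeWhile_cons, hy]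
      apply ih
      rw [PySem.Dict.keys_modify]
      rw [PySem.Dict.keys_insert_of_contains]
      · exact hd
      · rw [pv_contains_of_keys d S _ hd]; exact hy
    · have hy' : S.contains (pvKey y) = false := by simpa using hy
      rw [if_neg (by rw [pv_contains_of_keys d S _ hd, hy']; simp)]
      rw [List.takeWhile_cons, hy']
      simp

-- A's value-set test, read off the values list
theorem pv_values_cond (l : List Int) :
    ((PySem.Set.ofList l).length = 1 ∧ (PySem.Set.ofList l).sum = 1)
      ↔ (l ≠ [] ∧ ∀ v ∈ l, v = (1:Int)) := by
  constructor
  · rintro ⟨h1, h2⟩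
    match hof : PySem.Set.ofList l with
    | [] => rw [hof] at h1; simp at h1
    | a :: t =>
      rw [hof] at h1 h2
      have ht : t = [] := by simpa using h1
      subst ht
      simp at h2
      constructor
      · intro hl; subst hl; simp [PySem.Set.ofList] at hof
      · intro v hv
        have : v ∈ PySem.Set.ofList l := (PySem.Set.mem_ofList l v).mpr hv
        rw [hof] at this
        simp at this
        omega
  · rintro ⟨h1, h2⟩
    have hnd : (PySem.Set.ofList l).Nodup := PySem.Set.nodup_ofList l
    have hall : ∀ v ∈ PySem.Set.ofList l, v = 1 := by
      intro v hv; exact h2 v ((PySem.Set.mem_ofList l v).mp hv)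
    have hne : PySem.Set.ofList l ≠ [] := by
      match l, h1 with
      | x :: l', _ =>
        intro hc
        have : x ∈ PySem.Set.ofList (x :: l') := (PySem.Set.mem_ofList _ x).mpr (by simp)
        rw [hc] at this; simp at this
    match hof : PySem.Set.ofList l with
    | [] => exact absurd hof hne
    | a :: t =>
      rw [hof] at hall hnd
      have ha : a = 1 := hall a (by simp)
      have ht : t = [] := by
        rw [List.eq_nil_iff_forall_not_mem]
        intro b hb
        have hb1 : b = 1 := hall b (by simp [hb])
        rw [List.nodup_cons] at hnd
        exact hnd.1 (by rw [ha, ← hb1]; exact hb)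
      subst ht ha
      simp

-- Source B's loop against an any-scan
theorem pv_bLoop_eq_any (t : List String) (dic : List String) :
    pvBLoop t dic
      = if dic.any (fun x => decide (pvSortedChars x = t)) = true then 1 else 2 := by
  induction dic with
  | nil => simp [pvBLoop]
  | cons x rest ih =>
    rw [pvBLoop, List.any_cons]
    by_cases hx : pvSortedChars x = t
    · simp [hx]
    · simp only [if_neg hx, decide_eq_false hx, Bool.false_or]
      exact ih

-- the outer loop against B's sorted-form scan
theorem pv_main (S : List String) (hS : S.Nodup) (dic : List String) :
    pvOuter (PySem.Dict.mk (S.map (fun k => (k, (0:Int))))) dic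
      = if S ≠ [] ∧ dic.any (fun x =>
            decide (pvSortedChars x = PySem.List.sorted S (fun k => k) false)) = true
        then 1 else 2 := by
  induction dic with
  | nil => simp [pvOuter]
  | cons x rest ih =>
    simp only [pvOuter]
    have hsize : (PySem.Dict.mk (S.map (fun k => (k, (0:Int))))).size = S.length := by
      simp [PySem.Dict.size]
    rw [hsize]
    by_cases hlen : PySem.Str.len x = (S.length : Int)
    · rw [if_pos hlen]
      have hkeys0 : (PySem.Dict.mk (S.map (fun k => (k, (0:Int))))).keys = S := by
        rw [PySem.Dict.keys_mk]; simp [Function.comp_def]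
      rw [pv_countLoop_eq S x.toList _ hkeys0]
      set q := (x.toList.takeWhile (fun y => S.contains (pvKey y))).map pvKey with hqdef
      have hqS : ∀ k ∈ q, k ∈ S := by
        intro k hk
        rcases List.mem_map.mp hk with ⟨y, hy, rfl⟩
        have := List.mem_takeWhile_imp hy
        simpa [List.contains_eq_mem] using this
      have hitems := pv_modify_fold S hS q hqS (fun _ => (0:Int))
      beta_reduce at hitems
      have hvals : (q.foldl (fun dd k => dd.modify k 0 (· + 1))
          (PySem.Dict.mk (S.map (fun k => (k, (0:Int)))))).values
          = S.map (fun k => ((q.count k : Nat) : Int)) := by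
        simp [PySem.Dict.values, hitems, List.map_map, Function.comp_def]
      have hkeysd : (q.foldl (fun dd k => dd.modify k 0 (· + 1))
          (PySem.Dict.mk (S.map (fun k => (k, (0:Int)))))).keys = S := by
        simp [PySem.Dict.keys, hitems, List.map_map, Function.comp_def]
      have hlen' : (x.toList.map pvKey).length = S.length := by
        simp only [PySem.Str.len, Nat.cast_inj] at hlen
        simpa using hlen
      have hqtw : q = (x.toList.map pvKey).takeWhile (fun k => S.contains k) := by
        rw [hqdef, List.takeWhile_map]
        simp [Function.comp_def, List.contains_eq_mem]
      have hcond : ((PySem.Set.ofList ((q.foldl (fun dd k => dd.modify k 0 (· + 1))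
            (PySem.Dict.mk (S.map (fun k => (k, (0:Int)))))).values)).length = 1 ∧
            (PySem.Set.ofList ((q.foldl (fun dd k => dd.modify k 0 (· + 1))
            (PySem.Dict.mk (S.map (fun k => (k, (0:Int)))))).values)).sum = 1)
          ↔ (S ≠ [] ∧ ∀ k, k ∈ (x.toList.map pvKey) ↔ k ∈ S) := by
        rw [hvals, pv_values_cond]
        constructor
        · rintro ⟨h1, h2⟩
          refine ⟨by simpa [List.map_eq_nil_iff] using h1, ?_⟩
          rw [← pv_core S (x.toList.map pvKey) hS hlen', ← hqtw]
          intro k hk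
          have := h2 _ (List.mem_map.mpr ⟨k, hk, rfl⟩)
          exact_mod_cast this
        · rintro ⟨h1, h2⟩
          have hcount := (pv_core S (x.toList.map pvKey) hS hlen').mpr h2
          rw [← hqtw] at hcount
          refine ⟨by simpa [List.map_eq_nil_iff] using h1, ?_⟩
          intro v hv
          rcases List.mem_map.mp hv with ⟨k, hk, rfl⟩
          exact_mod_cast hcount k hk
      have hPx : ((decide (pvSortedChars x = PySem.List.sorted S (fun k => k) false)) = true)
          ↔ (∀ k, k ∈ (x.toList.map pvKey) ↔ k ∈ S) := by
        simp only [decide_eq_true_eq, pvSortedChars]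
        rw [pv_sorted_iff S (x.toList.map (fun c => String.mk [c])) hS]
        constructor
        · rintro ⟨_, h⟩ k
          simpa [pvKey] using h k
        · intro h
          refine ⟨by simpa [pvKey] using hlen', fun k => ?_⟩
          simpa [pvKey] using h k
      by_cases hc : S ≠ [] ∧ ∀ k, k ∈ (x.toList.map pvKey) ↔ k ∈ S
      · rw [if_pos (hcond.mpr hc), if_pos ⟨hc.1, by rw [List.any_cons, hPx.mpr hc.2]; simp⟩]
      · rw [if_neg (fun h => hc (hcond.mp h)), hkeysd]
        have hz : pvZero S = PySem.Dict.mk (S.map (fun k => (k, (0:Int)))) := by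
          have := pv_zero_fold S []
          simpa [pvZero, PySem.Set.update_nil_left, PySem.Dict.empty,
            PySem.Set.ofList_eq_self_of_nodup S hS] using this
        rw [hz, ih]
        apply if_congr _ rfl rfl
        apply and_congr_right
        intro h1
        have hPxf : (decide (pvSortedChars x = PySem.List.sorted S (fun k => k) false)) = false := by
          rw [← Bool.not_eq_true]
          intro hp
          exact hc ⟨h1, hPx.mp hp⟩
        rw [List.any_cons, hPxf]
        simp
    · rw [if_neg hlen, ih]
      apply if_congr _ rfl rfl
      apply and_congr_right
      intro _
      have hPxf : (decide (pvSortedChars x = PySem.List.sorted S (fun k => k) false)) = false := by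
        rw [decide_eq_false]
        intro hp
        apply hlen
        have hl := congrArg List.length hp
        simp only [pvSortedChars, PySem.List.length_sorted, List.length_map] at hl
        simp only [PySem.Str.len]
        exact_mod_cast hl
      rw [List.any_cons, hPxf]
      simp

-- ===== VERDICT (by name: the statement is the Claim_ definition above) =====
theorem solution_spec : Claim_equal_solution := by
  intro spell dic _
  show solution spell dic = solution_alt spell dic
  unfold solution solution_alt
  have h0 : pvZero spell = PySem.Dict.mk ((PySem.Set.ofList spell).map (fun k => (k, (0:Int)))) := by
    have := pv_zero_fold spell []
    simpa [pvZero, PySem.Set.update_nil_left, PySem.Dict.empty] using this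
  rw [h0, pv_main _ (PySem.Set.nodup_ofList spell)]
  simp only []
  by_cases h1 : PySem.List.sorted (PySem.Set.ofList spell) (fun k => k) false = []
  · have hS : PySem.Set.ofList spell = [] := (PySem.List.sorted_eq_nil_iff _ _ _).mp h1
    simp [hS, PySem.List.sorted_eq_nil_iff]
  · have hS : PySem.Set.ofList spell ≠ [] := fun h => h1 (by simp [h, PySem.List.sorted])
    rw [if_neg h1, pv_bLoop_eq_any]
    by_cases h2 : dic.any (fun x =>
        decide (pvSortedChars x = PySem.List.sorted (PySem.Set.ofList spell) (fun k => k) false)) = true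
    · rw [if_pos ⟨hS, h2⟩, if_pos h2]
    · rw [if_neg (by tauto), if_neg h2]
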